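-- pv_equiv track=rewrite | github.com/jmsaavedrar/programacion | M3/ej_1.py | es_binario
-- ===== SOURCE A (Python) =====
-- def es_binario(mi_input):
--     binario = True
--     i = 0
--     n = len(mi_input)
--     while binario and i < n :
--         if mi_input[i] != '0' and mi_input[i] != '1' :
--             binario = False
--         i = i + 1
--     return binario
-- ===== SOURCE B (Python) =====
-- def es_binario(mi_input):
--     return set(mi_input) <= {'0', '1'}
-- ===== Notes on version B (the rewrite author's own statement) =====
-- stated objective: idiomatic
-- what changed: Replaced the flag-and-index while loop with early exit by building the set of distinct characters once and testing subset inclusion in the binary digit set.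
import Mathlib
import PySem

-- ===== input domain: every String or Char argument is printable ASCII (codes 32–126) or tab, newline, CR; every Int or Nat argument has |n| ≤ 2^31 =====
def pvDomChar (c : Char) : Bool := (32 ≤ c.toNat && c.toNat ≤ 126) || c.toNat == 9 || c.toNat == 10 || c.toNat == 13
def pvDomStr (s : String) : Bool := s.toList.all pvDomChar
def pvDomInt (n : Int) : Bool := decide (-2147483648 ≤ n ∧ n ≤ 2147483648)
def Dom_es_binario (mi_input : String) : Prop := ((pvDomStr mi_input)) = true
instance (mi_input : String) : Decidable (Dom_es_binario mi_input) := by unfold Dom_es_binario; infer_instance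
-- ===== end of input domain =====

-- B replaces A's flag-and-index while loop with a build-the-distinct-character-set pass followed by one subset test (idiomatic; no speed claim).

-- ===== PORT A =====
-- A's while loop: flag `binario`, index i; once the flag is false the loop exits.
def esBinLoop (binario : Bool) (cs : List Char) : Bool :=
  match cs with
  | [] => binario
  | c :: rest =>
    if binario then
      esBinLoop (if c ≠ '0' ∧ c ≠ '1' then false else binario) rest
    else binario

def es_binario (mi_input : String) : Bool := esBinLoop true mi_input.toList

-- ===== PORT B =====
-- B: set(mi_input) <= {'0','1'}
def es_binario_alt (mi_input : String) : Bool :=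
  PySem.Set.issubset (PySem.Set.ofList mi_input.toList) (PySem.Set.ofList ['0', '1'])

-- ===== PRECONDITION & SPEC =====
def Spec_es_binario (mi_input : String) (out : Bool) : Prop := out = es_binario_alt mi_input
instance (mi_input : String) (out : Bool) : Decidable (Spec_es_binario mi_input out) := by unfold Spec_es_binario; infer_instance

-- ===== CLAIM (what is proved, stated in full; the proofs are below) =====
def Claim_equal_es_binario : Prop := ∀ (mi_input : String), Dom_es_binario mi_input → Spec_es_binario mi_input (es_binario mi_input)

-- ===== LEMMAS AND PROOFS =====

-- ===== VERDICT (by name: the statement is the Claim_ definition above) =====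
theorem esBinLoop_false (cs : List Char) : esBinLoop false cs = false := by
  cases cs <;> simp [esBinLoop]

theorem esBinLoop_all (cs : List Char) :
    esBinLoop true cs = cs.all (fun c => c = '0' || c = '1') := by
  induction cs with
  | nil => rfl
  | cons c rest ih =>
    by_cases h : c = '0' ∨ c = '1'
    · rcases h with h | h <;> simp [esBinLoop, h, ih]
    · push Not at h
      simp [esBinLoop, h.1, h.2, esBinLoop_false]

theorem es_binario_spec : Claim_equal_es_binario := by
  intro s _
  unfold Spec_es_binario es_binario es_binario_alt
  rw [esBinLoop_all]
  have key : (PySem.Set.issubset (PySem.Set.ofList s.toList) (PySem.Set.ofList ['0', '1']) = true)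
      ↔ (s.toList.all (fun c => c = '0' || c = '1') = true) := by
    rw [PySem.Set.issubset_iff]
    simp only [List.all_eq_true]
    constructor
    · intro h x hx
      have := h x (by rw [PySem.Set.mem_ofList]; exact hx)
      rw [PySem.Set.mem_ofList] at this
      simpa using this
    · intro h x hx
      rw [PySem.Set.mem_ofList] at hx ⊢
      have := h x hx
      simp at this ⊢
      tauto
  exact Bool.eq_iff_iff.mpr key.symm
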